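-- pv_equiv track=rewrite | github.com/PanDAWMS/panda-server | pandaserver/taskbuffer/ProcessGroups.py | getProcessGroup
-- ===== SOURCE A (Python) =====
-- processGroups = [('others',       []),
--                  ('evgensimul',   ['evgen','simul']),
--                  ('reprocessing', ['reprocessing']),
--                  ('test',         ['prod_test','rc_test','validation']),
--                  ('mcore',        ['mcore']),
--                  ('group',        ['group']),
--                  ]
--
-- def getProcessGroup(valGroup):
--     tmpGroup = None
--     for tmpKey,tmpList in processGroups:
--         # set default
--         if tmpGroup == None:
--             tmpGroup = tmpKey
--             continue
--         if valGroup in tmpList: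
--             tmpGroup = tmpKey
--             break
--     # return
--     return tmpGroup
-- ===== SOURCE B (Python) =====
-- _GROUP_MAP = {
--     'evgen': 'evgensimul',
--     'simul': 'evgensimul',
--     'reprocessing': 'reprocessing',
--     'prod_test': 'test',
--     'rc_test': 'test',
--     'validation': 'test',
--     'mcore': 'mcore',
--     'group': 'group',
-- }
--
-- def getProcessGroup(valGroup):
--     return _GROUP_MAP.get(valGroup, 'others')
-- ===== Notes on version B (the rewrite author's own statement) =====
-- stated objective: simpler
-- what changed: Replaces the scan over (group, trigger-list) pairs with leftover-default loop state by a single flat trigger-to-group dict lookup falling back to the default group.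
import Mathlib
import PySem

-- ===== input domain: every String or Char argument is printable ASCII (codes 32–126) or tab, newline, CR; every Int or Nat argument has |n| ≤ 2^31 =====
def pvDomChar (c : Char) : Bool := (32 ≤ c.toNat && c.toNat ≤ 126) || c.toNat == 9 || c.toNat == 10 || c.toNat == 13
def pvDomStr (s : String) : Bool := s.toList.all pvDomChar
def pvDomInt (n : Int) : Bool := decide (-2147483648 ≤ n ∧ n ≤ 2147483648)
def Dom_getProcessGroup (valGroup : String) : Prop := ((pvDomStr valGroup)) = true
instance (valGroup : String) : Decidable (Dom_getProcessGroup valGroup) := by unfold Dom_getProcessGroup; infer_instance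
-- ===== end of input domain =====

-- B replaces A's scan over (group, trigger-list) pairs (with its loop-state default) by one
-- flat trigger->group dict lookup with default 'others'; objective: simpler. Equivalence proved on Dom.

-- ===== PORT A =====
def processGroups : List (String × List String) :=
  [("others",       []),
   ("evgensimul",   ["evgen", "simul"]),
   ("reprocessing", ["reprocessing"]),
   ("test",         ["prod_test", "rc_test", "validation"]),
   ("mcore",        ["mcore"]),
   ("group",        ["group"])]

-- the for-loop with its Optional tmpGroup state, break included
def pgLoop (valGroup : String) (tmpGroup : Option String) : List (String × List String) → Option String
  | [] => tmpGroup
  | (tmpKey, tmpList) :: rest =>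
    if tmpGroup = none then pgLoop valGroup (some tmpKey) rest
    else if valGroup ∈ tmpList then some tmpKey
    else pgLoop valGroup tmpGroup rest

def getProcessGroup (valGroup : String) : String :=
  match pgLoop valGroup none processGroups with
  | some g => g
  | none => ""   -- unreachable: processGroups is nonempty, Python never returns None here

-- ===== PORT B =====
def groupMap : PySem.Dict String String :=
  PySem.Dict.ofList
    [("evgen", "evgensimul"), ("simul", "evgensimul"),
     ("reprocessing", "reprocessing"),
     ("prod_test", "test"), ("rc_test", "test"), ("validation", "test"),
     ("mcore", "mcore"), ("group", "group")]

def getProcessGroup_alt (valGroup : String) : String :=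
  PySem.Dict.getD groupMap valGroup "others"

-- ===== PRECONDITION & SPEC =====
def Spec_getProcessGroup (valGroup : String) (out : String) : Prop := out = getProcessGroup_alt valGroup
instance (valGroup : String) (out : String) : Decidable (Spec_getProcessGroup valGroup out) := by unfold Spec_getProcessGroup; infer_instance

-- ===== CLAIM (what is proved, stated in full; the proofs are below) =====
def Claim_equal_getProcessGroup : Prop := ∀ (valGroup : String), Dom_getProcessGroup valGroup → Spec_getProcessGroup valGroup (getProcessGroup valGroup)

-- ===== LEMMAS AND PROOFS =====

-- ===== VERDICT (by name: the statement is the Claim_ definition above) =====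
theorem getProcessGroup_spec : Claim_equal_getProcessGroup := by
  intro v _
  unfold Spec_getProcessGroup getProcessGroup getProcessGroup_alt
  have hmap : groupMap = PySem.Dict.mk
      [("evgen", "evgensimul"), ("simul", "evgensimul"),
       ("reprocessing", "reprocessing"),
       ("prod_test", "test"), ("rc_test", "test"), ("validation", "test"),
       ("mcore", "mcore"), ("group", "group")] := by decide
  simp only [pgLoop, processGroups, hmap, PySem.Dict.getD,
    PySem.Dict.get?_mk_cons, List.mem_cons, List.not_mem_nil]
  by_cases h1 : v = "evgen" <;> by_cases h2 : v = "simul" <;>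
  by_cases h3 : v = "reprocessing" <;> by_cases h4 : v = "prod_test" <;>
  by_cases h5 : v = "rc_test" <;> by_cases h6 : v = "validation" <;>
  by_cases h7 : v = "mcore" <;> by_cases h8 : v = "group" <;>
  (first
    | (subst v; decide)
    | simp [PySem.Dict.get?, h1, h2, h3, h4, h5, h6, h7, h8, Ne.symm h1, Ne.symm h2,
        Ne.symm h3, Ne.symm h4, Ne.symm h5, Ne.symm h6, Ne.symm h7, Ne.symm h8])
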